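-- pv_equiv track=rewrite | github.com/krodas7/telecomtp | sistema_construccion/middleware_config.py | validate_middleware_config
-- ===== SOURCE A (Python) =====
-- def validate_middleware_config(middleware_list):
--     """
--     Valida la configuración de middleware
--
--     Args:
--         middleware_list: Lista de middleware a validar
--
--     Returns:
--         Tuple (is_valid, errors)
--     """
--     errors = []
--
--     # Verificar que el middleware de seguridad esté presente
--     required_security_middleware = [
--         'django.middleware.security.SecurityMiddleware',
--         'django.middleware.csrf.CsrfViewMiddleware',
--     ]
--
--     for required in required_security_middleware:
--         if required not in middleware_list:
--             errors.append(f"Middleware de seguridad requerido faltante: {required}")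
--
--     # Verificar que el middleware de autenticación esté presente
--     required_auth_middleware = [
--         'django.contrib.sessions.middleware.SessionMiddleware',
--         'django.contrib.auth.middleware.AuthenticationMiddleware',
--     ]
--
--     for required in required_auth_middleware:
--         if required not in middleware_list:
--             errors.append(f"Middleware de autenticación requerido faltante: {required}")
--
--     # Verificar que el middleware de mensajes esté presente
--     if 'django.contrib.messages.middleware.MessageMiddleware' not in middleware_list:
--         errors.append("Middleware de mensajes requerido faltante")
--
--     # Verificar que el middleware común esté presente
--     if 'django.middleware.common.CommonMiddleware' not in middleware_list:
--         errors.append("Middleware común requerido faltante")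
--
--     return len(errors) == 0, errors
-- ===== SOURCE B (Python) =====
-- _N_SEC = 'django.middleware.security.SecurityMiddleware'
-- _N_CSRF = 'django.middleware.csrf.CsrfViewMiddleware'
-- _N_SES = 'django.contrib.sessions.middleware.SessionMiddleware'
-- _N_AUTH = 'django.contrib.auth.middleware.AuthenticationMiddleware'
-- _N_MSG = 'django.contrib.messages.middleware.MessageMiddleware'
-- _N_COM = 'django.middleware.common.CommonMiddleware'
--
-- def validate_middleware_config(middleware_list):
--     # single pass over the input: set a presence flag per required middleware
--     sec = csrf = ses = auth = msg = com = False
--     for m in middleware_list: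
--         if m == _N_SEC:
--             sec = True
--         elif m == _N_CSRF:
--             csrf = True
--         elif m == _N_SES:
--             ses = True
--         elif m == _N_AUTH:
--             auth = True
--         elif m == _N_MSG:
--             msg = True
--         elif m == _N_COM:
--             com = True
--     errors = []
--     if not sec:
--         errors.append('Middleware de seguridad requerido faltante: ' + _N_SEC)
--     if not csrf:
--         errors.append('Middleware de seguridad requerido faltante: ' + _N_CSRF)
--     if not ses:
--         errors.append('Middleware de autenticación requerido faltante: ' + _N_SES)
--     if not auth:
--         errors.append('Middleware de autenticación requerido faltante: ' + _N_AUTH)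
--     if not msg:
--         errors.append('Middleware de mensajes requerido faltante')
--     if not com:
--         errors.append('Middleware común requerido faltante')
--     return not errors, errors
-- ===== Notes on version B (the rewrite author's own statement) =====
-- stated objective: alternative
-- what changed: Inverted the loop: A iterates over the required names and scans the whole input list for each one, while B makes a single pass over the input list updating six presence flags and then emits the fixed messages from the final flags without ever searching the input.
import Mathlib
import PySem

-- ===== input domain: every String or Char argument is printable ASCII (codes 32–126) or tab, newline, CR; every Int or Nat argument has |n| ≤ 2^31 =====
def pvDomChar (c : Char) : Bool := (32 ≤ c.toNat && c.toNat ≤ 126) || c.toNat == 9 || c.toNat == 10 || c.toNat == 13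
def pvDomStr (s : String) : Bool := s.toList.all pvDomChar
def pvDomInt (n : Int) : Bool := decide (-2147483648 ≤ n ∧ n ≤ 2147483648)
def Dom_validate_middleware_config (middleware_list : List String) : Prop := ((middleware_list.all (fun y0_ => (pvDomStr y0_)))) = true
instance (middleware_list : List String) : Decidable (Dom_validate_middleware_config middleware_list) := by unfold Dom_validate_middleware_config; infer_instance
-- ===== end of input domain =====

-- B inverts the loop structure: a single pass over the input list sets six presence flags,
-- then the fixed messages are emitted from the final flags (objective: alternative).

-- ===== PORT A =====
def validate_middleware_config (middleware_list : List String) : Bool × List String :=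
  let errors : List String := []
  let required_security_middleware : List String :=
    ["django.middleware.security.SecurityMiddleware",
     "django.middleware.csrf.CsrfViewMiddleware"]
  let errors := required_security_middleware.foldl (fun errors required =>
    if ¬ (required ∈ middleware_list) then
      errors ++ ["Middleware de seguridad requerido faltante: " ++ required]
    else errors) errors
  let required_auth_middleware : List String :=
    ["django.contrib.sessions.middleware.SessionMiddleware",
     "django.contrib.auth.middleware.AuthenticationMiddleware"]
  let errors := required_auth_middleware.foldl (fun errors required =>
    if ¬ (required ∈ middleware_list) then
      errors ++ ["Middleware de autenticación requerido faltante: " ++ required]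
    else errors) errors
  let errors := if ¬ ("django.contrib.messages.middleware.MessageMiddleware" ∈ middleware_list) then
      errors ++ ["Middleware de mensajes requerido faltante"] else errors
  let errors := if ¬ ("django.middleware.common.CommonMiddleware" ∈ middleware_list) then
      errors ++ ["Middleware común requerido faltante"] else errors
  (errors.length == 0, errors)

-- ===== PORT B =====
-- one step of B's single pass: set the flag of the name m matches, if any
def pvFlagStep (s : Bool × Bool × Bool × Bool × Bool × Bool) (m : String) :
    Bool × Bool × Bool × Bool × Bool × Bool :=
  let (sec, csrf, ses, auth, msg, com) := s
  if m = "django.middleware.security.SecurityMiddleware" then (true, csrf, ses, auth, msg, com)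
  else if m = "django.middleware.csrf.CsrfViewMiddleware" then (sec, true, ses, auth, msg, com)
  else if m = "django.contrib.sessions.middleware.SessionMiddleware" then (sec, csrf, true, auth, msg, com)
  else if m = "django.contrib.auth.middleware.AuthenticationMiddleware" then (sec, csrf, ses, true, msg, com)
  else if m = "django.contrib.messages.middleware.MessageMiddleware" then (sec, csrf, ses, auth, true, com)
  else if m = "django.middleware.common.CommonMiddleware" then (sec, csrf, ses, auth, msg, true)
  else (sec, csrf, ses, auth, msg, com)

def validate_middleware_config_alt (middleware_list : List String) : Bool × List String :=
  let flags := middleware_list.foldl pvFlagStep (false, false, false, false, false, false)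
  let (sec, csrf, ses, auth, msg, com) := flags
  let errors : List String := []
  let errors := if !sec then errors ++ ["Middleware de seguridad requerido faltante: " ++ "django.middleware.security.SecurityMiddleware"] else errors
  let errors := if !csrf then errors ++ ["Middleware de seguridad requerido faltante: " ++ "django.middleware.csrf.CsrfViewMiddleware"] else errors
  let errors := if !ses then errors ++ ["Middleware de autenticación requerido faltante: " ++ "django.contrib.sessions.middleware.SessionMiddleware"] else errors
  let errors := if !auth then errors ++ ["Middleware de autenticación requerido faltante: " ++ "django.contrib.auth.middleware.AuthenticationMiddleware"] else errors
  let errors := if !msg then errors ++ ["Middleware de mensajes requerido faltante"] else errors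
  let errors := if !com then errors ++ ["Middleware común requerido faltante"] else errors
  (errors.isEmpty, errors)

-- ===== PRECONDITION & SPEC =====
def Spec_validate_middleware_config (middleware_list : List String) (out : Bool × List String) : Prop := out = validate_middleware_config_alt middleware_list
instance (middleware_list : List String) (out : Bool × List String) : Decidable (Spec_validate_middleware_config middleware_list out) := by unfold Spec_validate_middleware_config; infer_instance

-- ===== CLAIM (what is proved, stated in full; the proofs are below) =====
def Claim_equal_validate_middleware_config : Prop := ∀ (middleware_list : List String), Dom_validate_middleware_config middleware_list → Spec_validate_middleware_config middleware_list (validate_middleware_config middleware_list)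

-- ===== LEMMAS AND PROOFS =====

-- the single pass computes exactly the six membership facts
theorem pvFlags_foldl (l : List String) (s : Bool × Bool × Bool × Bool × Bool × Bool) :
    l.foldl pvFlagStep s =
      (s.1 || decide ("django.middleware.security.SecurityMiddleware" ∈ l),
       s.2.1 || decide ("django.middleware.csrf.CsrfViewMiddleware" ∈ l),
       s.2.2.1 || decide ("django.contrib.sessions.middleware.SessionMiddleware" ∈ l),
       s.2.2.2.1 || decide ("django.contrib.auth.middleware.AuthenticationMiddleware" ∈ l),
       s.2.2.2.2.1 || decide ("django.contrib.messages.middleware.MessageMiddleware" ∈ l),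
       s.2.2.2.2.2 || decide ("django.middleware.common.CommonMiddleware" ∈ l)) := by
  induction l generalizing s with
  | nil => simp
  | cons x t ih =>
    obtain ⟨a, b, c, d, e, f⟩ := s
    rw [List.foldl_cons]
    simp only [pvFlagStep]
    split_ifs with h1 h2 h3 h4 h5 h6
    · subst h1; rw [ih]; simp [List.mem_cons]
    · subst h2; rw [ih]; simp [List.mem_cons]
    · subst h3; rw [ih]; simp [List.mem_cons]
    · subst h4; rw [ih]; simp [List.mem_cons]
    · subst h5; rw [ih]; simp [List.mem_cons]
    · subst h6; rw [ih]; simp [List.mem_cons]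
    · rw [ih]; simp [List.mem_cons, eq_comm, h1, h2, h3, h4, h5, h6]

-- ===== VERDICT (by name: the statement is the Claim_ definition above) =====
theorem validate_middleware_config_spec : Claim_equal_validate_middleware_config := by
  intro l _
  show _ = _
  by_cases h1 : "django.middleware.security.SecurityMiddleware" ∈ l <;>
  by_cases h2 : "django.middleware.csrf.CsrfViewMiddleware" ∈ l <;>
  by_cases h3 : "django.contrib.sessions.middleware.SessionMiddleware" ∈ l <;>
  by_cases h4 : "django.contrib.auth.middleware.AuthenticationMiddleware" ∈ l <;>
  by_cases h5 : "django.contrib.messages.middleware.MessageMiddleware" ∈ l <;>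
  by_cases h6 : "django.middleware.common.CommonMiddleware" ∈ l <;>
  simp [validate_middleware_config, validate_middleware_config_alt, pvFlags_foldl, h1, h2, h3, h4, h5, h6]
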